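-- pv_equiv track=rewrite | github.com/tallestorange/competitive_programming | problems/ABC131/abc131_e.py | f
-- ===== SOURCE A (Python) =====
-- def f(N, K):
--     for i in range(1, N+1):
--         a = i*(i-1)//2
--         for j in range(1, N+1):
--             b = j
--             for k in range(0, N+1):
--                 c = k
--                 if i+j+k+1==N and a+b+c==K:
--                     return (i, j, k)
--     return (-1, -1, -1)
-- ===== SOURCE B (Python) =====
-- def f(N, K):
--     # j + k is forced to N-1-i, and b + c = j + k, so for each i a solution
--     # exists iff K - i*(i-1)//2 == N-1-i; the lexicographically first (j, k)
--     # is then (1, N-2-i), valid while N-2-i >= 0.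
--     for i in range(1, N - 1):
--         if K - i * (i - 1) // 2 == N - 1 - i:
--             return (i, 1, N - 2 - i)
--     return (-1, -1, -1)
-- ===== Notes on version B (the rewrite author's own statement) =====
-- stated objective: faster
-- what changed: Replaced A's triple nested scan over (i,j,k) with a single loop over i: j+k is forced to N-1-i by the first constraint, so a solution for i exists iff K - i*(i-1)//2 == N-1-i, with the lexicographically first pair (j,k) = (1, N-2-i).
import Mathlib
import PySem

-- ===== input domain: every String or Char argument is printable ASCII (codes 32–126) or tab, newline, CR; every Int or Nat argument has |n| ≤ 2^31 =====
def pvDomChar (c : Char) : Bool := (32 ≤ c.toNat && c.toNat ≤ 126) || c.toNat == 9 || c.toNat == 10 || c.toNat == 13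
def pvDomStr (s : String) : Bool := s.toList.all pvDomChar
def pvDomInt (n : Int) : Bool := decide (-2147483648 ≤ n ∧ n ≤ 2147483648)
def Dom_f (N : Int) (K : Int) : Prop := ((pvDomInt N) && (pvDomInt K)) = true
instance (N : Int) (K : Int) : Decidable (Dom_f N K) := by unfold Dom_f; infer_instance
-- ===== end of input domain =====

-- B replaces A's triple nested scan by a single loop over i: j+k is forced to
-- N-1-i, so a solution for i exists iff K - i*(i-1)//2 = N-1-i, with first
-- (j,k) = (1, N-2-i).  Objective: faster (O(N) vs O(N^3)).

-- ===== PORT A =====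
def f (N : Int) (K : Int) : List Int :=
  match (PySem.List.pyRange 1 (N+1) 1).findSome? (fun i =>
    let a := PySem.Int.floordiv (i*(i-1)) 2
    (PySem.List.pyRange 1 (N+1) 1).findSome? (fun j =>
      let b := j
      (PySem.List.pyRange 0 (N+1) 1).findSome? (fun k =>
        let c := k
        if i+j+k+1 = N ∧ a+b+c = K then some [i, j, k] else none))) with
  | some r => r
  | none => [-1, -1, -1]

-- ===== PORT B =====
def f_alt (N : Int) (K : Int) : List Int :=
  match (PySem.List.pyRange 1 (N-1) 1).findSome? (fun i =>
    if K - PySem.Int.floordiv (i*(i-1)) 2 = N-1-i then some [i, 1, N-2-i] else none) with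
  | some r => r
  | none => [-1, -1, -1]

-- ===== PRECONDITION & SPEC =====
def Spec_f (N : Int) (K : Int) (out : List Int) : Prop := out = f_alt N K
instance (N : Int) (K : Int) (out : List Int) : Decidable (Spec_f N K out) := by unfold Spec_f; infer_instance

-- ===== CLAIM (what is proved, stated in full; the proofs are below) =====
def Claim_equal_f : Prop := ∀ (N : Int) (K : Int), Dom_f N K → Spec_f N K (f N K)

-- ===== LEMMAS AND PROOFS =====

-- findSome? respects pointwise equality on the members of the list
theorem pvFindSome?_congr {α β : Type} (g g' : α → Option β) :
    ∀ l : List α, (∀ x ∈ l, g x = g' x) → l.findSome? g = l.findSome? g' := by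
  intro l
  induction l with
  | nil => intro _; rfl
  | cons x xs ih =>
    intro h
    rw [List.findSome?_cons, List.findSome?_cons, h x (by simp), ih (fun y hy => h y (by simp [hy]))]

-- a function that is none everywhere on a range scans to none
theorem pvFindSome?_none {β : Type} (g : Int → Option β) (a b : Int)
    (h : ∀ x, a ≤ x → x < b → g x = none) :
    (PySem.List.pyRange a b 1).findSome? g = none := by
  rw [List.findSome?_eq_none_iff]
  intro x hx
  rw [PySem.List.mem_pyRange_one] at hx
  exact h x hx.1 hx.2

-- scanning a range for a function with a unique hit k0
theorem pvFindSome?_unique {β : Type} (g : Int → Option β) (k0 : Int) (v : β)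
    (hg : ∀ k, g k = if k = k0 then some v else none) :
    ∀ (n : Nat) (a b : Int), (b - a).toNat = n →
      (PySem.List.pyRange a b 1).findSome? g = if a ≤ k0 ∧ k0 < b then some v else none := by
  intro n
  induction n with
  | zero =>
    intro a b h
    rw [PySem.List.pyRange_one_eq_nil (by omega), List.findSome?_nil, if_neg (by omega)]
  | succ m ih =>
    intro a b h
    have hab : a < b := by omega
    rw [PySem.List.pyRange_one_cons hab, List.findSome?_cons, hg a]
    by_cases hk : a = k0
    · rw [if_pos hk, if_pos (by omega)]
    · rw [if_neg hk]
      show (PySem.List.pyRange (a+1) b 1).findSome? g = _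
      rw [ih (a+1) b (by omega)]
      by_cases hc : a + 1 ≤ k0 ∧ k0 < b
      · rw [if_pos hc, if_pos (by omega)]
      · rw [if_neg hc, if_neg (by omega)]

-- the two inner loops of A, for a fixed i ≥ 1 and abstract a = i*(i-1)//2
theorem pvInner_eq (N K i A : Int) (hi : 1 ≤ i) :
    ((PySem.List.pyRange 1 (N+1) 1).findSome? (fun j =>
      (PySem.List.pyRange 0 (N+1) 1).findSome? (fun k =>
        if i+j+k+1 = N ∧ A+j+k = K then some [i, j, k] else none)))
    = if K - A = N-1-i ∧ i < N-1 then some [i, 1, N-2-i] else none := by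
  by_cases hC : K - A = N - 1 - i
  · -- the k-loop has a unique hit at k = N-1-i-j
    have hk : ∀ j : Int,
        ((PySem.List.pyRange 0 (N+1) 1).findSome? (fun k =>
          if i+j+k+1 = N ∧ A+j+k = K then some [i, j, k] else none))
        = if 0 ≤ N-1-i-j ∧ N-1-i-j < N+1 then some [i, j, N-1-i-j] else none := by
      intro j
      refine pvFindSome?_unique _ (N-1-i-j) [i, j, N-1-i-j] ?_ (N+1-0).toNat 0 (N+1) rfl
      intro k
      by_cases hhit : k = N-1-i-j
      · rw [if_pos (by constructor <;> omega), if_pos hhit, hhit]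
      · rw [if_neg (by omega), if_neg hhit]
    rw [pvFindSome?_congr _ _ _ (fun j _ => hk j)]
    by_cases hiN : i < N - 1
    · -- j = 1 is the first (and first possible) hit
      have h1 : (1:Int) < N + 1 := by omega
      rw [PySem.List.pyRange_one_cons h1, List.findSome?_cons]
      rw [if_pos (by constructor <;> omega)]
      rw [if_pos ⟨hC, hiN⟩]
      norm_num
      omega
    · -- i ≥ N-1: for every j ≥ 1, N-1-i-j < 0, so no hit
      rw [pvFindSome?_none _ 1 (N+1) (fun j hj _ => by rw [if_neg (by omega)]),
        if_neg (by omega)]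
  · -- the two equations are jointly unsatisfiable
    rw [pvFindSome?_none _ 1 (N+1) (fun j _ _ =>
      pvFindSome?_none _ 0 (N+1) (fun k _ _ => by rw [if_neg (by omega)])),
      if_neg (by omega)]

-- the outer loops of A and B compute the same Option value
theorem pvOuter_eq (N K : Int) :
    ((PySem.List.pyRange 1 (N+1) 1).findSome? (fun i =>
      (PySem.List.pyRange 1 (N+1) 1).findSome? (fun j =>
        (PySem.List.pyRange 0 (N+1) 1).findSome? (fun k =>
          if i+j+k+1 = N ∧ PySem.Int.floordiv (i*(i-1)) 2 + j + k = K
          then some [i, j, k] else none))))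
    = (PySem.List.pyRange 1 (N-1) 1).findSome? (fun i =>
        if K - PySem.Int.floordiv (i*(i-1)) 2 = N-1-i then some [i, 1, N-2-i] else none) := by
  rw [pvFindSome?_congr _
    (fun i => if K - PySem.Int.floordiv (i*(i-1)) 2 = N-1-i ∧ i < N-1
              then some [i, 1, N-2-i] else none) _
    (fun i hi => pvInner_eq N K i _ ((PySem.List.mem_pyRange_one.mp hi).1))]
  by_cases hN : 2 ≤ N
  · rw [PySem.List.pyRange_one_append 1 (N-1) (N+1) (by omega) (by omega),
      List.findSome?_append,
      pvFindSome?_none _ (N-1) (N+1) (fun i hi _ => by rw [if_neg (by omega)]),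
      Option.or_none]
    exact pvFindSome?_congr _ _ _ (fun i hi => by
      have := PySem.List.mem_pyRange_one.mp hi
      by_cases hc : K - PySem.Int.floordiv (i*(i-1)) 2 = N-1-i
      · rw [if_pos ⟨hc, by omega⟩, if_pos hc]
      · rw [if_neg (by omega), if_neg hc])
  · rw [pvFindSome?_none _ 1 (N+1) (fun i hi _ => by rw [if_neg (by omega)]),
      PySem.List.pyRange_one_eq_nil (by omega), List.findSome?_nil]

-- ===== VERDICT (by name: the statement is the Claim_ definition above) =====
theorem f_spec : Claim_equal_f := by
  intro N K _
  unfold Spec_f f f_alt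
  rw [pvOuter_eq N K]
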